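-- pv_equiv track=rewrite | github.com/AzethMeron/Zeke-2.0 | tools.py | uppercase_segments
-- ===== SOURCE A (Python) =====
-- PUNCTUATION_LIST = [
-- ('.',' '),
-- ('?',' '),
-- ('!',' '),
-- (',',' '),
-- (':',' '),
-- (';',' '),
-- ('-',''),
-- ('(',' '),
-- (')',' '),
-- ('[',' '),
-- (']',' '),
-- ("'",''),
-- ('"','')
-- ]
--
-- def remove_punctuation(text):
--     for (mark,replacement) in PUNCTUATION_LIST:
--         text = text.replace(mark, replacement)
--     return text
--
-- def uppercase_segments(text):
--     output = []
--     trail = []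
--     words = remove_punctuation(text).split()
--     for word in words:
--         if word.isupper() and (len(word) > 1 or len(trail) > 0):
--             trail.append(word)
--         elif len(trail) > 0:
--             output.append(" ".join(trail))
--             trail.clear()
--     if len(trail) > 0:
--         output.append(" ".join(trail))
--     return output
-- ===== SOURCE B (Python) =====
-- PUNCTUATION_LIST = [
-- ('.',' '),
-- ('?',' '),
-- ('!',' '),
-- (',',' '),
-- (':',' '),
-- (';',' '),
-- ('-',''),
-- ('(',' '),
-- (')',' '),
-- ('[',' '),
-- (']',' '),
-- ("'",''),
-- ('"','')
-- ]
--
-- def remove_punctuation(text):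
--     for (mark,replacement) in PUNCTUATION_LIST:
--         text = text.replace(mark, replacement)
--     return text
--
-- def _take_upper(words):
--     run = []
--     while words and words[0].isupper():
--         run.append(words[0])
--         words = words[1:]
--     return run, words
--
-- def _first_long(run):
--     for k, w in enumerate(run):
--         if len(w) > 1:
--             return k
--     return None
--
-- def uppercase_segments(text):
--     words = remove_punctuation(text).split()
--     segs = []
--     while words:
--         if words[0].isupper():
--             run, words = _take_upper(words)
--             k = _first_long(run)
--             if k is not None:
--                 segs.append(" ".join(run[k:]))
--         else:
--             words = words[1:]
--     return segs
-- ===== Notes on version B (the rewrite author's own statement) =====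
-- stated objective: alternative
-- what changed: A's single pass with an (output, trail) accumulator state machine is replaced by an explicit run decomposition: repeatedly take the maximal leading run of uppercase words, drop its leading single-character words, and emit the joined remainder if any word of length > 1 exists in the run.
import Mathlib
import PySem

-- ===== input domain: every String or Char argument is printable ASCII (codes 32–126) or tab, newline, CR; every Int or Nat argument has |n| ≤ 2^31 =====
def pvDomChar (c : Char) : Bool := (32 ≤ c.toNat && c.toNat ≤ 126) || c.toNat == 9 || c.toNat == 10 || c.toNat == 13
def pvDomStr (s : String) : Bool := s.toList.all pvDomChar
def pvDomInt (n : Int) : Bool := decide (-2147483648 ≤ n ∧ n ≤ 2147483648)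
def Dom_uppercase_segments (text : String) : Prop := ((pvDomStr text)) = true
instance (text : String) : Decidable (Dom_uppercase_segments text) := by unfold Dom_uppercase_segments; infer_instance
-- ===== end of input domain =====

-- B replaces A's word-by-word accumulator/flush state machine by an explicit
-- run decomposition (take the maximal uppercase run, drop its leading one-char
-- words, emit the rest): objective 'alternative', same cost, no speed claim.

-- ===== PORT A =====
-- shared helper: PUNCTUATION_LIST / remove_punctuation (identical in Source A and Source B)
def pvPunct : List (String × String) :=
  [(".", " "), ("?", " "), ("!", " "), (",", " "), (":", " "), (";", " "),
   ("-", ""), ("(", " "), (")", " "), ("[", " "), ("]", " "), ("'", ""), ("\"", "")]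

def remove_punctuation (text : String) : String :=
  pvPunct.foldl (fun t (p : String × String) => PySem.Str.replace t p.1 p.2) text

-- str.isupper(): at least one cased character and no lowercase one.
-- Exact on the ASCII domain (where cased characters are exactly the letters).
def pyIsupper (w : String) : Bool :=
  w.toList.any PySem.Chars.isalpha && w.toList.all (fun c => !PySem.Chars.islower c)

-- one step of A's "for word in words" loop over the state (output, trail)
def stepA (st : List String × List String) (word : String) : List String × List String :=
  if pyIsupper word && (decide (1 < PySem.Str.len word) || decide (0 < st.2.length)) then
    (st.1, st.2 ++ [word])
  else if 0 < st.2.length then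
    (st.1 ++ [PySem.Str.join " " st.2], [])
  else st

def finishA (st : List String × List String) : List String :=
  if 0 < st.2.length then st.1 ++ [PySem.Str.join " " st.2] else st.1

def uppercase_segments (text : String) : List String :=
  finishA ((PySem.Str.split₀ (remove_punctuation text)).foldl stepA ([], []))

-- ===== PORT B =====
-- _take_upper: split off the maximal leading run of uppercase words
def takeUpper : List String → List String × List String
  | [] => ([], [])
  | w :: ws =>
    if pyIsupper w then
      let p := takeUpper ws
      (w :: p.1, p.2)
    else ([], w :: ws)

-- _first_long: index of the first word of length > 1, if any
def firstLong : List String → Option Nat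
  | [] => none
  | w :: ws => if 1 < PySem.Str.len w then some 0 else (firstLong ws).map (· + 1)

theorem takeUpper_len_le (ws : List String) : (takeUpper ws).2.length ≤ ws.length := by
  induction ws with
  | nil => simp [takeUpper]
  | cons w ws ih =>
    simp only [takeUpper]
    split
    · exact Nat.le_succ_of_le ih
    · exact Nat.le_refl _

-- the "while words:" loop of Source B
def loopB : List String → List String
  | [] => []
  | w :: ws =>
    if pyIsupper w then
      let p := takeUpper ws
      match firstLong (w :: p.1) with
      | some k => PySem.Str.join " " ((w :: p.1).drop k) :: loopB p.2
      | none => loopB p.2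
    else loopB ws
termination_by ws => ws.length
decreasing_by
  · exact Nat.lt_succ_of_le (takeUpper_len_le ws)
  · exact Nat.lt_succ_self _

def uppercase_segments_alt (text : String) : List String :=
  loopB (PySem.Str.split₀ (remove_punctuation text))

-- ===== PRECONDITION & SPEC =====
def Spec_uppercase_segments (text : String) (out : List String) : Prop := out = uppercase_segments_alt text
instance (text : String) (out : List String) : Decidable (Spec_uppercase_segments text out) := by unfold Spec_uppercase_segments; infer_instance

-- ===== CLAIM (what is proved, stated in full; the proofs are below) =====
def Claim_equal_uppercase_segments : Prop := ∀ (text : String), Dom_uppercase_segments text → Spec_uppercase_segments text (uppercase_segments text)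

-- ===== LEMMAS AND PROOFS =====

-- B's loop, expressed through the run decomposition of its argument
theorem loopB_run (ws : List String) :
    loopB ws = match firstLong (takeUpper ws).1 with
      | some k => PySem.Str.join " " ((takeUpper ws).1.drop k) :: loopB (takeUpper ws).2
      | none => loopB (takeUpper ws).2 := by
  cases ws with
  | nil => simp [takeUpper, firstLong, loopB]
  | cons w ws =>
    by_cases h : pyIsupper w
    · simp only [takeUpper, loopB, h, if_true]
    · simp [takeUpper, loopB, h, firstLong]

-- the combined loop invariant: A's fold-and-finish from state (out, trail)
-- equals out ++ B's run-based output (with the open trail joined to the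
-- current uppercase run when trail is nonempty)
theorem mainA_eq_loopB (ws : List String) :
    (∀ out, finishA (ws.foldl stepA (out, [])) = out ++ loopB ws) ∧
    (∀ out trail, trail ≠ [] →
      finishA (ws.foldl stepA (out, trail)) =
        out ++ PySem.Str.join " " (trail ++ (takeUpper ws).1) :: loopB (takeUpper ws).2) := by
  induction ws with
  | nil =>
    constructor
    · intro out; simp [finishA, loopB]
    · intro out trail ht
      simp [finishA, takeUpper, loopB, List.length_pos_iff, ht]
  | cons w ws ih =>
    obtain ⟨ihM, ihI⟩ := ih
    constructor
    · intro out
      by_cases hu : pyIsupper w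
      · by_cases hl : 1 < PySem.Str.len w
        · -- multi-char uppercase word opens a trail
          have hst : stepA (out, []) w = (out, [w]) := by
            simp only [stepA, hu, hl, decide_true, Bool.true_and, Bool.true_or, if_true,
              List.nil_append]
          rw [List.foldl_cons, hst, ihI out [w] (by simp)]
          rw [loopB_run (w :: ws)]
          simp only [takeUpper, hu, if_true, firstLong, hl, if_true]
          rfl
        · -- single-char uppercase word with empty trail: A skips it
          have hst : stepA (out, []) w = (out, []) := by
            simp only [stepA, hu, hl, decide_false, Bool.true_and, Bool.false_or, decide_eq_true_eq]
            simp
          rw [List.foldl_cons, hst, ihM out]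
          rw [loopB_run (w :: ws)]
          simp only [takeUpper, hu, if_true, firstLong, hl, if_false]
          rw [loopB_run ws]
          cases firstLong (takeUpper ws).1 <;> simp
      · -- non-uppercase word with empty trail: both skip it
        have hst : stepA (out, []) w = (out, []) := by
          simp [stepA, hu]
        rw [List.foldl_cons, hst, ihM out]
        simp [loopB, hu]
    · intro out trail ht
      by_cases hu : pyIsupper w
      · -- uppercase word extends the open trail
        have hst : stepA (out, trail) w = (out, trail ++ [w]) := by
          simp [stepA, hu, List.length_pos_iff, ht]
        rw [List.foldl_cons, hst, ihI out (trail ++ [w]) (by simp)]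
        simp only [takeUpper, hu, if_true, List.append_assoc, List.singleton_append]
      · -- non-uppercase word flushes the trail
        have hst : stepA (out, trail) w = (out ++ [PySem.Str.join " " trail], []) := by
          simp [stepA, hu, List.length_pos_iff, ht]
        rw [List.foldl_cons, hst, ihM (out ++ [PySem.Str.join " " trail])]
        simp [takeUpper, loopB, hu]

-- ===== VERDICT (by name: the statement is the Claim_ definition above) =====
theorem uppercase_segments_spec : Claim_equal_uppercase_segments := by
  intro text _
  unfold Spec_uppercase_segments uppercase_segments uppercase_segments_alt
  simpa using (mainA_eq_loopB (PySem.Str.split₀ (remove_punctuation text))).1 []
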